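-- pv_equiv track=rewrite | github.com/aandroide/mandrakodi.github.io | scripts/generate_lastminute_complete.py | categorize_channel
-- ===== SOURCE A (Python) =====
-- def categorize_channel(channel_id, channel_name):
--     """Categorizza canale"""
--
--     name_lower = channel_name.lower()
--
--     if any(kw in name_lower for kw in ['sport', 'dazn', 'calcio', 'f1', 'motogp', 'tennis']):
--         return 'Sport'
--     elif 'cinema' in name_lower:
--         return 'Cinema'
--     elif any(kw in name_lower for kw in ['serie', 'atlantic', 'crime']):
--         return 'Serie TV'
--     elif any(kw in name_lower for kw in ['news', 'tg24']):
--         return 'News'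
--     elif any(kw in name_lower for kw in ['documentar', 'arte', 'classica']):
--         return 'Documentari'
--     else:
--         return 'Intrattenimento'
-- ===== SOURCE B (Python) =====
-- # B: instead of testing each keyword with 'in' along an if/elif chain, scan the
-- # lowered name once position by position; at each position test which keywords
-- # start there (a flat keyword -> priority map) and keep the minimum priority
-- # seen in an accumulator, then index the category table with it.
-- KEYWORD_PRIORITY = {
--     'sport': 0, 'dazn': 0, 'calcio': 0, 'f1': 0, 'motogp': 0, 'tennis': 0,
--     'cinema': 1,
--     'serie': 2, 'atlantic': 2, 'crime': 2,
--     'news': 3, 'tg24': 3,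
--     'documentar': 4, 'arte': 4, 'classica': 4,
-- }
-- CATEGORIES = ['Sport', 'Cinema', 'Serie TV', 'News', 'Documentari', 'Intrattenimento']
--
-- def categorize_channel(channel_id, channel_name):
--     """Categorizza canale"""
--     name_lower = channel_name.lower()
--     best = 5
--     for i in range(len(name_lower)):
--         for kw, p in KEYWORD_PRIORITY.items():
--             if p < best and name_lower.startswith(kw, i):
--                 best = p
--     return CATEGORIES[best]
-- ===== Notes on version B (the rewrite author's own statement) =====
-- stated objective: alternative
-- what changed: Replaced the if/elif chain of substring ('in') tests by a single left-to-right scan over the lowered name that, at each position, matches keywords from a flat keyword->priority map and keeps the minimum matched priority in an accumulator, finally indexing a category table.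
import Mathlib
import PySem

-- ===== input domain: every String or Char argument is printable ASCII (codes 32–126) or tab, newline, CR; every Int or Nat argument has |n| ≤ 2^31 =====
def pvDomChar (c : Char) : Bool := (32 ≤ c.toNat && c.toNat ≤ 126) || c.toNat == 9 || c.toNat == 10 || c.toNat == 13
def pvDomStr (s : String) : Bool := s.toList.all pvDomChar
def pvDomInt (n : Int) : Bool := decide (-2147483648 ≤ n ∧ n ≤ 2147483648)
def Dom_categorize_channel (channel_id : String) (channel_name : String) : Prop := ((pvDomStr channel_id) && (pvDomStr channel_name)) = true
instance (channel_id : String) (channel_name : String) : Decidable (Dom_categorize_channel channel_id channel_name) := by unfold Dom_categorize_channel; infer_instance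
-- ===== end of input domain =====

-- B replaces A's if/elif substring-test chain by one left-to-right scan of the lowered name,
-- matching keywords from a flat keyword->priority map at each position and keeping the minimum
-- matched priority, then indexing a category table (alternative algorithm; same asymptotic cost).


-- ===== PORT A =====
-- Port of A: the if/elif keyword chain, literal.
def categorize_channel (channel_id : String) (channel_name : String) : String :=
  let name_lower := PySem.Str.lower channel_name
  if (["sport", "dazn", "calcio", "f1", "motogp", "tennis"].any
      (fun kw => PySem.Str.isIn kw name_lower)) then "Sport"
  else if PySem.Str.isIn "cinema" name_lower then "Cinema"
  else if (["serie", "atlantic", "crime"].any (fun kw => PySem.Str.isIn kw name_lower)) then "Serie TV"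
  else if (["news", "tg24"].any (fun kw => PySem.Str.isIn kw name_lower)) then "News"
  else if (["documentar", "arte", "classica"].any (fun kw => PySem.Str.isIn kw name_lower)) then "Documentari"
  else "Intrattenimento"

-- ===== PORT B =====
-- KEYWORD_PRIORITY dict of Source B (insertion order), as keyword characters with priority.
def pvKwPrio : List (List Char × Nat) :=
  [("sport".toList, 0), ("dazn".toList, 0), ("calcio".toList, 0), ("f1".toList, 0),
   ("motogp".toList, 0), ("tennis".toList, 0),
   ("cinema".toList, 1),
   ("serie".toList, 2), ("atlantic".toList, 2), ("crime".toList, 2),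
   ("news".toList, 3), ("tg24".toList, 3),
   ("documentar".toList, 4), ("arte".toList, 4), ("classica".toList, 4)]

-- CATEGORIES table of Source B.
def pvCats : List String :=
  ["Sport", "Cinema", "Serie TV", "News", "Documentari", "Intrattenimento"]

-- Port of B: scan positions of the lowered name, keep the minimum matched priority.
-- Python's name_lower.startswith(kw, i) with 0 ≤ i is exactly kw.isPrefixOf (nl.drop i);
-- CATEGORIES[best] always has best ≤ 5 in range, ported as getD (default unreachable).
def categorize_channel_alt (channel_id : String) (channel_name : String) : String :=
  let nl := PySem.Chars.lower channel_name.toList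
  let best := (List.range nl.length).foldl
    (fun b i =>
      pvKwPrio.foldl
        (fun b kp => if kp.2 < b && kp.1.isPrefixOf (nl.drop i) then kp.2 else b) b)
    5
  pvCats.getD best "Intrattenimento"

-- ===== PRECONDITION & SPEC =====
def Spec_categorize_channel (channel_id : String) (channel_name : String) (out : String) : Prop := out = categorize_channel_alt channel_id channel_name
instance (channel_id : String) (channel_name : String) (out : String) : Decidable (Spec_categorize_channel channel_id channel_name out) := by unfold Spec_categorize_channel; infer_instance

-- ===== CLAIM (what is proved, stated in full; the proofs are below) =====
def Claim_equal_categorize_channel : Prop := ∀ (channel_id : String) (channel_name : String), Dom_categorize_channel channel_id channel_name → Spec_categorize_channel channel_id channel_name (categorize_channel channel_id channel_name)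

-- ===== LEMMAS AND PROOFS =====

-- All priorities matched at some position of nl, in scan order.
def pvCand (nl : List Char) : List Nat :=
  (List.range nl.length).flatMap
    (fun i => (pvKwPrio.filter (fun kp => kp.1.isPrefixOf (nl.drop i))).map (·.2))

theorem pv_inner_eq (t : List Char) (L : List (List Char × Nat)) (b : Nat) :
    L.foldl (fun b kp => if kp.2 < b && kp.1.isPrefixOf t then kp.2 else b) b
      = ((L.filter (fun kp => kp.1.isPrefixOf t)).map (·.2)).foldl min b := by
  induction L generalizing b with
  | nil => rfl
  | cons kp L ih =>
    simp only [List.foldl_cons, List.filter_cons]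
    by_cases h : kp.1.isPrefixOf t = true
    · simp only [h, Bool.and_true, if_pos, List.map_cons, List.foldl_cons]
      rw [ih]
      congr 1
      by_cases hlt : kp.2 < b
      · simp [hlt, Nat.min_eq_right (Nat.le_of_lt hlt)]
      · simp [hlt, Nat.min_eq_left (Nat.le_of_not_lt hlt)]
    · simp only [h, Bool.and_false, Bool.false_eq_true, if_false]
      exact ih b

theorem pv_foldl_min_flatMap {α : Type} (I : List α) (Ms : α → List Nat) (b : Nat) :
    I.foldl (fun b i => (Ms i).foldl min b) b = (I.flatMap Ms).foldl min b := by
  induction I generalizing b with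
  | nil => rfl
  | cons i I ih => simp [List.flatMap_cons, List.foldl_append, ih]

theorem pv_best_eq (nl : List Char) :
    (List.range nl.length).foldl
      (fun b i =>
        pvKwPrio.foldl
          (fun b kp => if kp.2 < b && kp.1.isPrefixOf (nl.drop i) then kp.2 else b) b)
      5 = (pvCand nl).foldl min 5 := by
  unfold pvCand
  rw [← pv_foldl_min_flatMap]
  apply List.foldl_ext
  intro b i _
  exact pv_inner_eq _ _ _

theorem pv_min_foldl_le_init (l : List Nat) (b : Nat) : l.foldl min b ≤ b := by
  induction l generalizing b with
  | nil => exact Nat.le_refl b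
  | cons x l ih => exact Nat.le_trans (ih _) (Nat.min_le_left b x)

theorem pv_min_foldl_le_mem (l : List Nat) (x : Nat) : x ∈ l → ∀ b, l.foldl min b ≤ x := by
  induction l with
  | nil => intro hx; cases hx
  | cons y l ih =>
    intro hx b
    rcases List.mem_cons.mp hx with h | h
    · subst h; exact Nat.le_trans (pv_min_foldl_le_init l _) (Nat.min_le_right b x)
    · exact ih h _

theorem pv_min_foldl_mem (l : List Nat) (b : Nat) : l.foldl min b = b ∨ l.foldl min b ∈ l := by
  induction l generalizing b with
  | nil => exact Or.inl rfl
  | cons x l ih =>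
    rcases ih (min b x) with h | h
    · rcases Nat.le_total b x with he | he
      · exact Or.inl (by rw [List.foldl_cons, h]; exact Nat.min_eq_left he)
      · refine Or.inr ?_
        rw [List.foldl_cons, h, Nat.min_eq_right he]
        exact List.mem_cons_self
    · exact Or.inr (List.mem_cons_of_mem _ h)

-- p occurs among the candidates iff some keyword of priority p is a substring of nl.
theorem pv_mem_cand (nl : List Char) (p : Nat) :
    p ∈ pvCand nl ↔ ∃ kp ∈ pvKwPrio, kp.2 = p ∧ PySem.Chars.isIn kp.1 nl = true := by
  unfold pvCand
  simp only [List.mem_flatMap, List.mem_range, List.mem_map, List.mem_filter]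
  constructor
  · rintro ⟨i, _, kp, ⟨hmem, hpre⟩, hp⟩
    exact ⟨kp, hmem, hp, (PySem.Chars.exists_prefix_drop_iff_isIn _ _).mp
      ⟨i, List.isPrefixOf_iff_prefix.mp hpre⟩⟩
  · rintro ⟨kp, hmem, hp, hin⟩
    obtain ⟨j, hj⟩ := (PySem.Chars.exists_prefix_drop_iff_isIn _ _).mpr hin
    have hne : kp.1 ≠ [] := by
      fin_cases hmem <;> simp
    have hjlt : j < nl.length := by
      by_contra hge
      have : nl.drop j = [] := List.drop_eq_nil_of_le (Nat.le_of_not_lt hge)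
      rw [this] at hj
      exact hne (List.prefix_nil.mp hj)
    exact ⟨j, hjlt, kp, ⟨hmem, List.isPrefixOf_iff_prefix.mpr hj⟩, hp⟩

theorem pv_g0 (nl : List Char) :
    (∃ kp ∈ pvKwPrio, kp.2 = 0 ∧ PySem.Chars.isIn kp.1 nl = true) ↔
      (["sport", "dazn", "calcio", "f1", "motogp", "tennis"].any
        fun kw => PySem.Chars.isIn kw.toList nl) = true := by
  simp [pvKwPrio]

theorem pv_g1 (nl : List Char) :
    (∃ kp ∈ pvKwPrio, kp.2 = 1 ∧ PySem.Chars.isIn kp.1 nl = true) ↔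
      "cinema".toList <:+: nl := by
  simp [pvKwPrio, PySem.Chars.isIn_iff_infix]

theorem pv_g2 (nl : List Char) :
    (∃ kp ∈ pvKwPrio, kp.2 = 2 ∧ PySem.Chars.isIn kp.1 nl = true) ↔
      (["serie", "atlantic", "crime"].any fun kw => PySem.Chars.isIn kw.toList nl) = true := by
  simp [pvKwPrio]

theorem pv_g3 (nl : List Char) :
    (∃ kp ∈ pvKwPrio, kp.2 = 3 ∧ PySem.Chars.isIn kp.1 nl = true) ↔
      (["news", "tg24"].any fun kw => PySem.Chars.isIn kw.toList nl) = true := by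
  simp [pvKwPrio]

theorem pv_g4 (nl : List Char) :
    (∃ kp ∈ pvKwPrio, kp.2 = 4 ∧ PySem.Chars.isIn kp.1 nl = true) ↔
      (["documentar", "arte", "classica"].any fun kw => PySem.Chars.isIn kw.toList nl) = true := by
  simp [pvKwPrio]

-- ===== VERDICT (by name: the statement is the Claim_ definition above) =====
set_option maxHeartbeats 1600000 in
theorem categorize_channel_spec : Claim_equal_categorize_channel := by
  intro channel_id channel_name _
  unfold Spec_categorize_channel categorize_channel categorize_channel_alt
  dsimp only
  rw [pv_best_eq]
  set nl := PySem.Chars.lower channel_name.toList with hnl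
  set r := (pvCand nl).foldl min 5 with hr
  have hle : ∀ p, (∃ kp ∈ pvKwPrio, kp.2 = p ∧ PySem.Chars.isIn kp.1 nl = true) → r ≤ p :=
    fun p h => pv_min_foldl_le_mem _ _ ((pv_mem_cand nl p).mpr h) _
  have hmem : r = 5 ∨ ∃ kp ∈ pvKwPrio, kp.2 = r ∧ PySem.Chars.isIn kp.1 nl = true := by
    rcases pv_min_foldl_mem (pvCand nl) 5 with h | h
    · exact Or.inl h
    · exact Or.inr ((pv_mem_cand nl r).mp h)
  simp only [pysem]
  rw [← hnl]
  by_cases h0 : (["sport", "dazn", "calcio", "f1", "motogp", "tennis"].any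
      fun kw => PySem.Chars.isIn kw.toList nl) = true
  · rw [if_pos h0]
    have h : r = 0 := Nat.le_zero.mp (hle 0 ((pv_g0 nl).mpr h0))
    rw [h]; rfl
  rw [if_neg h0]
  have hne0 : r ≠ 0 := by
    intro he
    rcases hmem with h5 | hx
    · omega
    · rw [he] at hx; exact h0 ((pv_g0 nl).mp hx)
  by_cases h1 : "cinema".toList <:+: nl
  · rw [if_pos h1]
    have hle1 : r ≤ 1 := hle 1 ((pv_g1 nl).mpr h1)
    have h : r = 1 := by omega
    rw [h]; rfl
  rw [if_neg h1]
  have hne1 : r ≠ 1 := by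
    intro he
    rcases hmem with h5 | hx
    · omega
    · rw [he] at hx; exact h1 ((pv_g1 nl).mp hx)
  by_cases h2 : (["serie", "atlantic", "crime"].any fun kw => PySem.Chars.isIn kw.toList nl) = true
  · rw [if_pos h2]
    have hle2 : r ≤ 2 := hle 2 ((pv_g2 nl).mpr h2)
    have h : r = 2 := by omega
    rw [h]; rfl
  rw [if_neg h2]
  have hne2 : r ≠ 2 := by
    intro he
    rcases hmem with h5 | hx
    · omega
    · rw [he] at hx; exact h2 ((pv_g2 nl).mp hx)
  by_cases h3 : (["news", "tg24"].any fun kw => PySem.Chars.isIn kw.toList nl) = true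
  · rw [if_pos h3]
    have hle3 : r ≤ 3 := hle 3 ((pv_g3 nl).mpr h3)
    have h : r = 3 := by omega
    rw [h]; rfl
  rw [if_neg h3]
  have hne3 : r ≠ 3 := by
    intro he
    rcases hmem with h5 | hx
    · omega
    · rw [he] at hx; exact h3 ((pv_g3 nl).mp hx)
  by_cases h4 : (["documentar", "arte", "classica"].any fun kw => PySem.Chars.isIn kw.toList nl) = true
  · rw [if_pos h4]
    have hle4 : r ≤ 4 := hle 4 ((pv_g4 nl).mpr h4)
    have h : r = 4 := by omega
    rw [h]; rfl
  rw [if_neg h4]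
  have hne4 : r ≠ 4 := by
    intro he
    rcases hmem with h5 | hx
    · omega
    · rw [he] at hx; exact h4 ((pv_g4 nl).mp hx)
  have h5 : r = 5 := by
    rcases hmem with h5 | ⟨kp, hk, hp, hin⟩
    · exact h5
    · exfalso
      fin_cases hk <;>
        first
        | exact h0 (List.any_eq_true.mpr ⟨"sport", by simp, hin⟩)
        | exact h0 (List.any_eq_true.mpr ⟨"dazn", by simp, hin⟩)
        | exact h0 (List.any_eq_true.mpr ⟨"calcio", by simp, hin⟩)
        | exact h0 (List.any_eq_true.mpr ⟨"f1", by simp, hin⟩)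
        | exact h0 (List.any_eq_true.mpr ⟨"motogp", by simp, hin⟩)
        | exact h0 (List.any_eq_true.mpr ⟨"tennis", by simp, hin⟩)
        | exact h2 (List.any_eq_true.mpr ⟨"serie", by simp, hin⟩)
        | exact h2 (List.any_eq_true.mpr ⟨"atlantic", by simp, hin⟩)
        | exact h2 (List.any_eq_true.mpr ⟨"crime", by simp, hin⟩)
        | exact h3 (List.any_eq_true.mpr ⟨"news", by simp, hin⟩)
        | exact h3 (List.any_eq_true.mpr ⟨"tg24", by simp, hin⟩)
        | exact h4 (List.any_eq_true.mpr ⟨"documentar", by simp, hin⟩)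
        | exact h4 (List.any_eq_true.mpr ⟨"arte", by simp, hin⟩)
        | exact h4 (List.any_eq_true.mpr ⟨"classica", by simp, hin⟩)
        | exact h1 ((PySem.Chars.isIn_iff_infix _ _).mp hin)
  rw [h5]; rfl
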